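-- pv_equiv track=rewrite | github.com/bayy1216/AlgorithmPractice | 프로그래머스/3/258705. 산 모양 타일링/산 모양 타일링.py | solution
-- ===== SOURCE A (Python) =====
-- def solution(n, tops):
--     answer = 0
--     dp = [0]*(2*n+2)
--     dp[1],dp[2] = 1, 2
--     if tops[0] == 1:
--         dp[2] = 3
--
--     for i in range(3,2*n+2):
--         current_top_index = i//2 - 1
--
--         if i%2 == 0:#짝수번째, 탑있거나 없거나
--             if tops[current_top_index] ==1:
--                 dp[i] = dp[i-1] * 2 + dp[i-2]
--             else:
--                 #현재 탑 아님
--                 dp[i] = (dp[i-2]+dp[i-1])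
--         else:#홀수번째, 전에꺼가 탑이였거나 없거나
--             dp[i] = dp[i-2]+dp[i-1]
--         dp[i] = dp[i] % 1_0007
--
--
--
--
--
--     return dp[2*n+1]
-- ===== SOURCE B (Python) =====
-- MOD = 10007
--
-- def _mul(A, B):
--     (a, b), (c, d) = A
--     (e, f), (g, h) = B
--     return ((a * e + b * g) % MOD, (a * f + b * h) % MOD), \
--            ((c * e + d * g) % MOD, (c * f + d * h) % MOD)
--
-- def _prod(ms):
--     if not ms:
--         return ((1, 0), (0, 1))
--     if len(ms) == 1:
--         return ms[0]
--     mid = len(ms) // 2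
--     return _mul(_prod(ms[:mid]), _prod(ms[mid:]))
--
-- def solution(n, tops):
--     # row-vector state (u, v) per mountain; each later mountain is a 2x2
--     # transfer matrix, multiplied together by divide and conquer.
--     u = 3 if tops[0] == 1 else 2
--     v = (1 + u) % MOD
--     ms = [((1, 1), (2, 3)) if tops[k] == 1 else ((1, 1), (1, 2)) for k in range(1, n)]
--     (a, b), (c, d) = _prod(ms)
--     return (u * b + v * d) % MOD
-- ===== Notes on version B (the rewrite author's own statement) =====
-- stated objective: alternative
-- what changed: Recasts the DP as linear algebra: each mountain after the first becomes a 2x2 transfer matrix mod 10007, the matrices are multiplied by recursive divide and conquer, and the answer is the base row vector times the product matrix — replacing A's flat 2n-cell array loop with i//2 index arithmetic and parity branching.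
import Mathlib
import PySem

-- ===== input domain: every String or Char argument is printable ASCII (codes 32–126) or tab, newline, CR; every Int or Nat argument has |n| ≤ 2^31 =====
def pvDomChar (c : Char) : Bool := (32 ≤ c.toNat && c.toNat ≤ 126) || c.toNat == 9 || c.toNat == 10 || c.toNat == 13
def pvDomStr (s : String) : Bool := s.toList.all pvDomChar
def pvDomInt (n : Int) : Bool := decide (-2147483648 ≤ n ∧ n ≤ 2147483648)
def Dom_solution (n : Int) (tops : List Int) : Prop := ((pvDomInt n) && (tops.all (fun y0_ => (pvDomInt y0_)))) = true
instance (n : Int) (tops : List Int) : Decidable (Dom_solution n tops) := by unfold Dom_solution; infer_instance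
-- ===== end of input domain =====

-- B recasts A's flat 2n-cell DP loop as a product of per-mountain 2x2 transfer
-- matrices mod 10007, computed by recursive divide and conquer (alternative
-- algorithmic structure, same asymptotic cost).

-- ===== PORT A =====
-- A's for-loop over range(3, 2*n+2); fuel = the number of remaining iterations,
-- i the running index.  Indices are Nat (getD/set): exact here because inside
-- Pre_ every index Python touches is nonnegative and in range, so getD equals
-- Python's dp[...]/tops[...] and Nat division i/2 equals Python's i//2.
def aLoop (tops : List Int) (fuel : Nat) (i : Nat) (dp : List Int) : List Int :=
  match fuel with
  | 0 => dp
  | f + 1 =>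
    let val : Int :=
      if i % 2 == 0 then
        (if tops.getD (i / 2 - 1) 0 == 1 then
          dp.getD (i - 1) 0 * 2 + dp.getD (i - 2) 0
        else dp.getD (i - 2) 0 + dp.getD (i - 1) 0)
      else dp.getD (i - 2) 0 + dp.getD (i - 1) 0
    aLoop tops f (i + 1) (dp.set i (PySem.Int.mod val 10007))

def solution (n : Int) (tops : List Int) : Int :=
  let dp := ((List.replicate (2 * n + 2).toNat 0).set 1 1).set 2 2
  let dp := if tops.getD 0 0 == 1 then dp.set 2 3 else dp
  let dp := aLoop tops (2 * n + 2 - 3).toNat 3 dp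
  dp.getD (2 * n + 1).toNat 0

-- ===== PORT B =====
-- Source B's _mul: 2x2 matrix product with each entry reduced mod 10007.
def mmul (A B : (Int × Int) × (Int × Int)) : (Int × Int) × (Int × Int) :=
  ((PySem.Int.mod (A.1.1 * B.1.1 + A.1.2 * B.2.1) 10007,
    PySem.Int.mod (A.1.1 * B.1.2 + A.1.2 * B.2.2) 10007),
   (PySem.Int.mod (A.2.1 * B.1.1 + A.2.2 * B.2.1) 10007,
    PySem.Int.mod (A.2.1 * B.1.2 + A.2.2 * B.2.2) 10007))

-- Source B's _prod: divide-and-conquer product of the matrix list (slices ms[:mid], ms[mid:]).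
def mprod (ms : List ((Int × Int) × (Int × Int))) : (Int × Int) × (Int × Int) :=
  match ms with
  | [] => ((1, 0), (0, 1))
  | [m] => m
  | m1 :: m2 :: rest =>
    let l := m1 :: m2 :: rest
    let mid := l.length / 2
    mmul (mprod (l.take mid)) (mprod (l.drop mid))
termination_by ms.length
decreasing_by
  · simp; omega
  · simp; omega

-- Source B's solution: base row vector (u, v) from tops[0]; the comprehension over
-- range(1, n) maps tops[k] to its transfer matrix (tops.getD k.toNat: exact
-- inside Pre_, where 1 ≤ k < n ≤ len(tops)); answer = second component of
-- (u, v) · mprod ms, mod 10007.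
def solution_alt (n : Int) (tops : List Int) : Int :=
  let u : Int := if tops.getD 0 0 == 1 then 3 else 2
  let v : Int := PySem.Int.mod (1 + u) 10007
  let ms := (PySem.List.pyRange 1 n 1).map (fun k =>
    if tops.getD k.toNat 0 == 1 then ((1, 1), (2, 3)) else ((1, 1), (1, 2)))
  let P := mprod ms
  PySem.Int.mod (u * P.1.2 + v * P.2.2) 10007

-- ===== PRECONDITION & SPEC =====
-- Exactly where Python A returns: with n ≤ 0 the dp array is too short (dp[1] or
-- dp[2] raises IndexError), and with tops shorter than n tops[0]/tops[i//2-1]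
-- raises IndexError.
def Pre_solution (n : Int) (tops : List Int) : Prop := 1 ≤ n ∧ n ≤ tops.length
instance (n : Int) (tops : List Int) : Decidable (Pre_solution n tops) := by
  unfold Pre_solution; infer_instance

def pvWitness_solution : Int × List Int := (4, [1, 1, 0, 1])

def Spec_solution (n : Int) (tops : List Int) (out : Int) : Prop := out = solution_alt n tops
instance (n : Int) (tops : List Int) (out : Int) : Decidable (Spec_solution n tops out) := by unfold Spec_solution; infer_instance

-- ===== CLAIM (what is proved, stated in full; the proofs are below) =====
def Claim_equal_solution : Prop := ∀ (n : Int) (tops : List Int), Dom_solution n tops → Pre_solution n tops → Spec_solution n tops (solution n tops)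

-- ===== LEMMAS AND PROOFS =====

-- the true (mod-free) 2x2 matrix product, identity, and row-vector action
def tmul (A B : (Int × Int) × (Int × Int)) : (Int × Int) × (Int × Int) :=
  ((A.1.1 * B.1.1 + A.1.2 * B.2.1, A.1.1 * B.1.2 + A.1.2 * B.2.2),
   (A.2.1 * B.1.1 + A.2.2 * B.2.1, A.2.1 * B.1.2 + A.2.2 * B.2.2))

def idm : (Int × Int) × (Int × Int) := ((1, 0), (0, 1))

def matProd (ms : List ((Int × Int) × (Int × Int))) : (Int × Int) × (Int × Int) :=
  ms.foldr tmul idm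

def vapp (s : Int × Int) (A : (Int × Int) × (Int × Int)) : Int × Int :=
  (s.1 * A.1.1 + s.2 * A.2.1, s.1 * A.1.2 + s.2 * A.2.2)

-- one step of A's recurrence on the (even cell, odd cell) pair of a mountain
def bStep (p : Int × Int) (t : Int) : Int × Int :=
  let u := if t == 1 then PySem.Int.mod (2 * p.2 + p.1) 10007
           else PySem.Int.mod (p.1 + p.2) 10007
  (u, PySem.Int.mod (u + p.2) 10007)

def matOf (t : Int) : (Int × Int) × (Int × Int) :=
  if t == 1 then ((1, 1), (2, 3)) else ((1, 1), (1, 2))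

-- entrywise congruence mod 10007
def mcong (A B : (Int × Int) × (Int × Int)) : Prop :=
  A.1.1 ≡ B.1.1 [ZMOD 10007] ∧ A.1.2 ≡ B.1.2 [ZMOD 10007] ∧
  A.2.1 ≡ B.2.1 [ZMOD 10007] ∧ A.2.2 ≡ B.2.2 [ZMOD 10007]

lemma pymod (a : Int) : PySem.Int.mod a 10007 = a % 10007 :=
  PySem.Int.mod_eq_emod_of_pos (by norm_num)

lemma getD_set_self (l : List Int) (i : Nat) (x : Int) (h : i < l.length) : (l.set i x).getD i 0 = x := by
  simp [List.getD, h]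
lemma getD_set_ne (l : List Int) (i k : Nat) (x : Int) (h : i ≠ k) : (l.set i x).getD k 0 = l.getD k 0 := by
  simp [List.getD, List.getElem?_set_ne h]

lemma aLoop_pairs (tops : List Int) (m : Nat) :
    ∀ (j : Nat) (dp : List Int) (u v : Int), 1 ≤ j →
      2 * (j + m) + 2 ≤ dp.length → j + m ≤ tops.length →
      dp.getD (2 * j) 0 = u → dp.getD (2 * j + 1) 0 = v →
      (aLoop tops (2 * m) (2 * j + 2) dp).getD (2 * (j + m) + 1) 0 =
        (((tops.drop j).take m).foldl bStep (u, v)).2 := by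
  induction m with
  | zero =>
    intro j dp u v _ _ _ _ hv
    simpa [aLoop] using hv
  | succ m ih =>
    intro j dp u v hj hlen htop hu hv
    have hjlen : j < tops.length := by omega
    have hb2 : 2 * j + 2 < dp.length := by omega
    have r1 : 2 * j + 2 - 1 = 2 * j + 1 := by omega
    have r2 : 2 * j + 2 - 2 = 2 * j := by omega
    have r3 : 2 * j + 2 + 1 - 1 = 2 * j + 2 := by omega
    have r4 : 2 * j + 2 + 1 - 2 = 2 * j + 1 := by omega
    have hx2 : (2 * j + 2) / 2 - 1 = j := by omega
    have h20 : ((2 * j + 2) % 2 == 0) = true := by simp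
    have h30 : ((2 * j + 2 + 1) % 2 == 0) = false := by simp [Nat.add_mod]
    rw [show 2 * (m + 1) = 2 * m + 1 + 1 from by ring]
    simp only [aLoop, r1, r2, r3, r4, hx2, h20, h30, if_true, Bool.false_eq_true, if_false, hu, hv]
    rw [getD_set_ne _ _ _ _ (show 2 * j + 2 ≠ 2 * j + 1 by omega), hv,
      getD_set_self _ _ _ hb2]
    rw [List.drop_eq_getElem_cons hjlen, List.take_succ_cons, List.foldl_cons]
    rw [show tops[j] = tops.getD j 0 from (List.getD_eq_getElem tops 0 hjlen).symm]
    have hX : (bStep (u, v) (tops.getD j 0)).1 =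
        PySem.Int.mod (if (tops.getD j 0 == 1) = true then v * 2 + u else u + v) 10007 := by
      simp [bStep]
      split <;> ring_nf
    have e1 : 2 * j + 2 + 1 + 1 = 2 * (j + 1) + 2 := by ring
    have e2 : 2 * (j + (m + 1)) + 1 = 2 * ((j + 1) + m) + 1 := by ring
    rw [e1, e2, ← hX]
    have hY : PySem.Int.mod (v + (bStep (u, v) (tops.getD j 0)).1) 10007 =
        (bStep (u, v) (tops.getD j 0)).2 := by
      simp only [bStep]
      ring_nf
    rw [hY]
    refine ih (j + 1) _ _ _ (by omega) (by simpa using by omega) (by omega) ?_ ?_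
    · rw [show 2 * (j + 1) = 2 * j + 2 from by ring,
        getD_set_ne _ _ _ _ (show 2 * j + 2 + 1 ≠ 2 * j + 2 by omega),
        getD_set_self _ _ _ hb2]
      rfl
    · rw [show 2 * (j + 1) + 1 = 2 * j + 2 + 1 from by ring,
        getD_set_self _ _ _ (by simpa using by omega)]
      rfl

lemma solution_eq (n : Int) (tops : List Int) :
    solution n tops =
      (aLoop tops (2 * n + 2 - 3).toNat 3
        (((List.replicate (2 * n + 2).toNat 0).set 1 1).set 2
          (if tops.getD 0 0 == 1 then 3 else 2))).getD (2 * n + 1).toNat 0 := by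
  unfold solution
  by_cases h : tops[0]?.getD 0 = (1 : Int) <;> simp [List.getD, h, List.set_set]

-- A's loop value equals the foldl of bStep over the later tops (reuse of aLoop_pairs)
lemma solution_fold (nn : Nat) (tops : List Int) (h1 : 1 ≤ nn) (h2 : nn ≤ tops.length) :
    solution (nn : Int) tops =
      (((tops.drop 1).take (nn - 1)).foldl bStep
        ((if tops.getD 0 0 == 1 then 3 else 2),
         PySem.Int.mod (1 + (if tops.getD 0 0 == 1 then 3 else 2)) 10007)).2 := by
  rw [solution_eq]
  set c : Int := if (tops.getD 0 0 == 1) = true then 3 else 2 with hc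
  set dp1 : List Int := ((List.replicate (2 * (nn : Int) + 2).toNat 0).set 1 1).set 2 c
    with hdp1
  have hlenrep : (List.replicate (2 * (nn : Int) + 2).toNat (0 : Int)).length = 2 * nn + 2 := by
    simp; omega
  have hlen1 : dp1.length = 2 * nn + 2 := by simp [hdp1, hlenrep]
  have hfuel : (2 * (nn : Int) + 2 - 3).toNat = 2 * (nn - 1) + 1 := by omega
  rw [hfuel]
  simp only [aLoop, show ((3 : Nat) % 2 == 0) = false from rfl, Bool.false_eq_true,
    if_false, show (3 : Nat) - 2 = 1 from rfl, show (3 : Nat) - 1 = 2 from rfl]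
  have hg1 : dp1.getD 1 0 = 1 := by
    rw [hdp1, getD_set_ne _ _ _ _ (by omega),
      getD_set_self _ _ _ (by rw [hlenrep]; omega)]
  have hg2 : dp1.getD 2 0 = c := by
    rw [hdp1, getD_set_self _ _ _ (by simp [hlenrep]; omega)]
  rw [hg1, hg2]
  have hmain := aLoop_pairs tops (nn - 1) 1 (dp1.set 3 (PySem.Int.mod (1 + c) 10007))
    c (PySem.Int.mod (1 + c) 10007) (le_refl 1)
    (by simp [hlen1]; omega) (by omega)
    (by rw [getD_set_ne _ _ _ _ (by omega)]; exact hg2)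
    (by rw [getD_set_self _ _ _ (by simp [hdp1, hlenrep]; omega)])
  rw [show (3 : Nat) + 1 = 2 * 1 + 2 from rfl,
    show (2 * ((nn : Nat) : Int) + 1).toNat = 2 * (1 + (nn - 1)) + 1 from by omega]
  exact hmain

-- ===== matrix algebra lemmas (B side) =====
lemma tmul_assoc (A B C : (Int × Int) × (Int × Int)) :
    tmul (tmul A B) C = tmul A (tmul B C) := by
  simp only [tmul, Prod.mk.injEq]
  refine ⟨⟨by ring, by ring⟩, by ring, by ring⟩

lemma tmul_idl (A : (Int × Int) × (Int × Int)) : tmul idm A = A := by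
  simp [tmul, idm]

lemma tmul_idr (A : (Int × Int) × (Int × Int)) : tmul A idm = A := by
  simp [tmul, idm]

lemma matProd_append (l1 l2 : List ((Int × Int) × (Int × Int))) :
    matProd (l1 ++ l2) = tmul (matProd l1) (matProd l2) := by
  induction l1 with
  | nil => simp [matProd, tmul_idl]
  | cons m l ih => simp [matProd, List.foldr_cons] at ih ⊢; rw [ih, tmul_assoc]

lemma mcong_refl (A : (Int × Int) × (Int × Int)) : mcong A A :=
  ⟨Int.ModEq.refl _, Int.ModEq.refl _, Int.ModEq.refl _, Int.ModEq.refl _⟩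

lemma mmul_cong {A A' B B' : (Int × Int) × (Int × Int)} (hA : mcong A A') (hB : mcong B B') :
    mcong (mmul A B) (tmul A' B') := by
  obtain ⟨a1, a2, a3, a4⟩ := hA
  obtain ⟨b1, b2, b3, b4⟩ := hB
  refine ⟨?_, ?_, ?_, ?_⟩ <;>
    simp only [mmul, tmul, pymod] <;>
    exact (Int.mod_modEq _ _).trans (Int.ModEq.add (Int.ModEq.mul ‹_› ‹_›) (Int.ModEq.mul ‹_› ‹_›))

lemma mprod_cong (ms : List ((Int × Int) × (Int × Int))) : mcong (mprod ms) (matProd ms) := by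
  induction ms using mprod.induct with
  | case1 =>
    simp only [mprod, matProd, List.foldr_nil]
    exact mcong_refl idm
  | case2 m =>
    simp only [mprod, matProd, List.foldr_cons, List.foldr_nil, tmul_idr]
    exact mcong_refl m
  | case3 m1 m2 rest l mid ih1 ih2 =>
    rw [mprod]
    have hsplit : matProd (m1 :: m2 :: rest) =
        tmul (matProd ((m1 :: m2 :: rest).take ((m1 :: m2 :: rest).length / 2)))
             (matProd ((m1 :: m2 :: rest).drop ((m1 :: m2 :: rest).length / 2))) := by
      rw [← matProd_append, List.take_append_drop]
    rw [hsplit]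
    exact mmul_cong ih1 ih2

lemma vapp_tmul (s : Int × Int) (A B : (Int × Int) × (Int × Int)) :
    vapp (vapp s A) B = vapp s (tmul A B) := by
  simp only [vapp, tmul, Prod.mk.injEq]
  exact ⟨by ring, by ring⟩

-- one bStep is congruent to one transfer-matrix application
lemma bStep_cong {s s' : Int × Int} (t : Int)
    (h1 : s.1 ≡ s'.1 [ZMOD 10007]) (h2 : s.2 ≡ s'.2 [ZMOD 10007]) :
    (bStep s t).1 ≡ (vapp s' (matOf t)).1 [ZMOD 10007] ∧
    (bStep s t).2 ≡ (vapp s' (matOf t)).2 [ZMOD 10007] := by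
  by_cases ht : (t == 1) = true
  · simp only [bStep, vapp, matOf, ht, if_true, pymod]
    have hu : 2 * s.2 + s.1 ≡ s'.1 * 1 + s'.2 * 2 [ZMOD 10007] := by
      calc 2 * s.2 + s.1 ≡ 2 * s'.2 + s'.1 [ZMOD 10007] := (Int.ModEq.mul_left 2 h2).add h1
        _ = s'.1 * 1 + s'.2 * 2 := by ring
    refine ⟨(Int.mod_modEq _ _).trans hu, (Int.mod_modEq _ _).trans ?_⟩
    calc (2 * s.2 + s.1) % 10007 + s.2 ≡ (s'.1 * 1 + s'.2 * 2) + s'.2 [ZMOD 10007] :=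
          ((Int.mod_modEq _ _).trans hu).add h2
      _ = s'.1 * 1 + s'.2 * 3 := by ring
  · simp only [bStep, vapp, matOf, ht, Bool.false_eq_true, if_false, pymod]
    have hu : s.1 + s.2 ≡ s'.1 * 1 + s'.2 * 1 [ZMOD 10007] := by
      calc s.1 + s.2 ≡ s'.1 + s'.2 [ZMOD 10007] := h1.add h2
        _ = s'.1 * 1 + s'.2 * 1 := by ring
    refine ⟨(Int.mod_modEq _ _).trans hu, (Int.mod_modEq _ _).trans ?_⟩
    calc (s.1 + s.2) % 10007 + s.2 ≡ (s'.1 * 1 + s'.2 * 1) + s'.2 [ZMOD 10007] :=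
          ((Int.mod_modEq _ _).trans hu).add h2
      _ = s'.1 * 1 + s'.2 * 2 := by ring

lemma fold_cong (ts : List Int) :
    ∀ (s s' : Int × Int), s.1 ≡ s'.1 [ZMOD 10007] → s.2 ≡ s'.2 [ZMOD 10007] →
      (ts.foldl bStep s).1 ≡ (vapp s' (matProd (ts.map matOf))).1 [ZMOD 10007] ∧
      (ts.foldl bStep s).2 ≡ (vapp s' (matProd (ts.map matOf))).2 [ZMOD 10007] := by
  induction ts with
  | nil =>
    intro s s' h1 h2
    simpa [matProd, vapp, idm] using ⟨h1, h2⟩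
  | cons t ts ih =>
    intro s s' h1 h2
    have hb := bStep_cong t h1 h2
    have := ih (bStep s t) (vapp s' (matOf t)) hb.1 hb.2
    simpa [matProd, List.foldr_cons, ← vapp_tmul] using this

lemma fold_bounds (ts : List Int) :
    ∀ (s : Int × Int), 0 ≤ s.2 → s.2 < 10007 →
      0 ≤ (ts.foldl bStep s).2 ∧ (ts.foldl bStep s).2 < 10007 := by
  induction ts with
  | nil => intro s h1 h2; exact ⟨h1, h2⟩
  | cons t ts ih =>
    intro s _ _
    exact ih (bStep s t)
      (PySem.Int.mod_nonneg _ (by norm_num)) (PySem.Int.mod_lt _ (by norm_num))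

lemma map_range_take (f : Int → (Int × Int) × (Int × Int)) (tops : List Int) (m : Nat) :
    ∀ (j : Nat), j + m ≤ tops.length →
      (List.range m).map (fun i => f (tops.getD (j + i) 0)) =
        ((tops.drop j).take m).map f := by
  induction m with
  | zero => intro j _; simp
  | succ m ih =>
    intro j hlen
    have hjlen : j < tops.length := by omega
    rw [List.range_succ_eq_map]
    simp only [List.map_cons, List.map_map]
    have hfun : ((fun i => f (tops.getD (j + i) 0)) ∘ Nat.succ) =
        (fun i => f (tops.getD ((j + 1) + i) 0)) := by
      funext i; simp only [Function.comp_apply]; congr 2; omega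
    rw [hfun, ih (j + 1) (by omega)]
    rw [List.drop_eq_getElem_cons hjlen, List.take_succ_cons, List.map_cons,
      show j + 0 = j from rfl,
      show tops[j] = tops.getD j 0 from (List.getD_eq_getElem tops 0 hjlen).symm]

-- ===== VERDICT (by name: the statement is the Claim_ definition above) =====
theorem solution_spec : Claim_equal_solution := by
  intro n tops _ hpre
  obtain ⟨hn1, hnlen⟩ := hpre
  obtain ⟨nn, rfl⟩ : ∃ nn : Nat, n = (nn : Int) :=
    ⟨n.toNat, (Int.toNat_of_nonneg (by omega)).symm⟩
  have hnn1 : 1 ≤ nn := by exact_mod_cast hn1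
  have hnnlen : nn ≤ tops.length := by exact_mod_cast hnlen
  unfold Spec_solution
  rw [solution_fold nn tops hnn1 hnnlen]
  set u : Int := if tops.getD 0 0 == 1 then 3 else 2 with hu
  set v : Int := PySem.Int.mod (1 + u) 10007 with hv
  set ts : List Int := (tops.drop 1).take (nn - 1) with hts
  -- B's matrix list is ts.map matOf
  have hms : (PySem.List.pyRange 1 ((nn : Nat) : Int) 1).map (fun k =>
      if tops.getD k.toNat 0 == 1 then ((1, 1), (2, 3)) else ((1, 1), (1, 2))) =
      ts.map matOf := by
    rw [PySem.List.pyRange_one, show (((nn : Nat) : Int) - 1).toNat = nn - 1 from by omega]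
    simp only [List.map_map]
    have hfun : ((fun k : Int =>
        if tops.getD k.toNat 0 == 1 then (((1:Int), (1:Int)), ((2:Int), (3:Int))) else ((1, 1), (1, 2))) ∘
          (fun i : Nat => (1 : Int) + i)) =
        (fun i : Nat => matOf (tops.getD (1 + i) 0)) := by
      funext i
      simp only [Function.comp, matOf]
      congr 2
    rw [hfun]
    exact map_range_take matOf tops (nn - 1) 1 (by omega)
  have halt : solution_alt ((nn : Nat) : Int) tops =
      PySem.Int.mod (u * (mprod (ts.map matOf)).1.2 + v * (mprod (ts.map matOf)).2.2) 10007 := by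
    show PySem.Int.mod _ 10007 = _
    rw [hms]
  rw [halt]
  -- both sides ≡ (vapp (u,v) (matProd (ts.map matOf))).2 mod 10007, A side already reduced
  have hcong := (fold_cong ts (u, v) (u, v) (Int.ModEq.refl _) (Int.ModEq.refl _)).2
  have hbnd := fold_bounds ts (u, v)
    (PySem.Int.mod_nonneg _ (by norm_num)) (PySem.Int.mod_lt _ (by norm_num))
  have hP := mprod_cong (ts.map matOf)
  have hBcong : u * (mprod (ts.map matOf)).1.2 + v * (mprod (ts.map matOf)).2.2 ≡
      (vapp (u, v) (matProd (ts.map matOf))).2 [ZMOD 10007] :=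
    (Int.ModEq.mul_left u hP.2.1).add (Int.ModEq.mul_left v hP.2.2.2)
  have hA : (ts.foldl bStep (u, v)).2 % 10007 = (ts.foldl bStep (u, v)).2 :=
    Int.emod_eq_of_lt hbnd.1 hbnd.2
  rw [pymod]
  calc (ts.foldl bStep (u, v)).2 = (ts.foldl bStep (u, v)).2 % 10007 := hA.symm
    _ = (vapp (u, v) (matProd (ts.map matOf))).2 % 10007 := hcong
    _ = (u * (mprod (ts.map matOf)).1.2 + v * (mprod (ts.map matOf)).2.2) % 10007 := hBcong.symm
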